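-- pv_equiv track=rewrite | github.com/ihanseol/04_PyhtonDemoDojang | 11_util/totalcmd python/03_GroundWater Ussage/27_Index/indexMaker_mokcha.py | make_duplicate_list
-- ===== SOURCE A (Python) =====
-- def make_duplicate_list(target_list):
--     new_list = []
--     target_indices = {4, 7, 11, 12}
--
--     for i, data in enumerate(target_list, start=1):
--         new_list.append(data)
--         if i in target_indices:
--             new_list.append(data)
--
--     return new_list
-- ===== SOURCE B (Python) =====
-- def make_duplicate_list(target_list):
--     result = list(target_list)
--     for p in (12, 11, 7, 4):
--         if p <= len(target_list):
--             result.insert(p, target_list[p - 1])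
--     return result
-- ===== Notes on version B (the rewrite author's own statement) =====
-- stated objective: alternative
-- what changed: Instead of scanning the whole list with enumerate and appending a duplicate at the flagged 1-based positions, B copies the list and performs at most four positional insertions at the fixed positions 12, 11, 7, 4 (descending, so earlier indices stay stable).
import Mathlib
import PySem

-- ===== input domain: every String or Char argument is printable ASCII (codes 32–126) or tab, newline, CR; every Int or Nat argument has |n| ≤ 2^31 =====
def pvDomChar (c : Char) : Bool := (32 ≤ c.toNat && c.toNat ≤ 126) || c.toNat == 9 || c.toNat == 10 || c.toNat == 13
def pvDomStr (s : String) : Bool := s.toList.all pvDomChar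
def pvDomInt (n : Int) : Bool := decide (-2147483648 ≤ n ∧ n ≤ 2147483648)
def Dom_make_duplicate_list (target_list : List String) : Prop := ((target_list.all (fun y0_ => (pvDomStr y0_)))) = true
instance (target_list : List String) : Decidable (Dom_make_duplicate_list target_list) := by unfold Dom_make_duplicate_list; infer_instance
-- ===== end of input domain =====

-- B replaces A's full enumerate-scan (append each element, append it again at the flagged
-- 1-based positions) by a copy of the list plus at most four positional insertions at the
-- fixed positions 12, 11, 7, 4 (descending, so earlier indices stay stable); same cost,
-- different shape ("alternative").

-- ===== PORT A =====
def make_duplicate_list (target_list : List String) : List String :=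
  let target_indices : PySem.Set Int := PySem.Set.ofList [4, 7, 11, 12]
  (PySem.List.enumerate target_list 1).foldl
    (fun new_list p =>
      let new_list := new_list ++ [p.2]
      if PySem.Set.contains target_indices p.1 then new_list ++ [p.2] else new_list)
    []

-- ===== PORT B =====
-- target_list[p-1] is ported with pyGet?/getD; the branch guarantees 1 ≤ p ≤ len, so it never defaults.
def make_duplicate_list_alt (target_list : List String) : List String :=
  [(12 : Nat), 11, 7, 4].foldl
    (fun result p =>
      if p ≤ target_list.length then
        PySem.List.insert result (p : Int) ((PySem.List.pyGet? target_list ((p : Int) - 1)).getD "")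
      else result)
    target_list

-- ===== PRECONDITION & SPEC =====
def Spec_make_duplicate_list (target_list : List String) (out : List String) : Prop := out = make_duplicate_list_alt target_list
instance (target_list : List String) (out : List String) : Decidable (Spec_make_duplicate_list target_list out) := by unfold Spec_make_duplicate_list; infer_instance

-- ===== CLAIM (what is proved, stated in full; the proofs are below) =====
def Claim_equal_make_duplicate_list : Prop := ∀ (target_list : List String), Dom_make_duplicate_list target_list → Spec_make_duplicate_list target_list (make_duplicate_list target_list)

-- ===== LEMMAS AND PROOFS =====

-- past position 12 the enumerate fold in A just appends every element unchanged
theorem pvA_tail (xs : List String) : ∀ (i : Int) (acc : List String), 13 ≤ i →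
    (PySem.List.enumerate xs i).foldl
      (fun new_list p => if p.1 = 4 ∨ p.1 = 7 ∨ p.1 = 11 ∨ p.1 = 12 then new_list ++ [p.2, p.2] else new_list ++ [p.2])
      acc = acc ++ xs := by
  induction xs with
  | nil => intro i acc _; simp [PySem.List.enumerate]
  | cons x xs ih =>
    intro i acc hi
    rw [PySem.List.enumerate_cons]
    simp only [List.foldl]
    rw [if_neg (by omega)]
    rw [ih (i + 1) _ (by omega)]
    simp

theorem pvBig (a1 a2 a3 a4 a5 a6 a7 a8 a9 a10 a11 a12 : String) (rest : List String) :
    make_duplicate_list (a1::a2::a3::a4::a5::a6::a7::a8::a9::a10::a11::a12::rest)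
      = make_duplicate_list_alt (a1::a2::a3::a4::a5::a6::a7::a8::a9::a10::a11::a12::rest) := by
  have hA : make_duplicate_list (a1::a2::a3::a4::a5::a6::a7::a8::a9::a10::a11::a12::rest)
      = [a1,a2,a3,a4,a4,a5,a6,a7,a7,a8,a9,a10,a11,a11,a12,a12] ++ rest := by
    unfold make_duplicate_list
    show (PySem.List.enumerate ([a1,a2,a3,a4,a5,a6,a7,a8,a9,a10,a11,a12] ++ rest) 1).foldl _ [] = _
    rw [PySem.List.enumerate_append, List.foldl_append]
    norm_num
    rw [pvA_tail rest _ _ (by norm_num)]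
    simp
  have hB : make_duplicate_list_alt (a1::a2::a3::a4::a5::a6::a7::a8::a9::a10::a11::a12::rest)
      = [a1,a2,a3,a4,a4,a5,a6,a7,a7,a8,a9,a10,a11,a11,a12,a12] ++ rest := by
    unfold make_duplicate_list_alt
    simp only [List.foldl, List.length_cons]
    norm_num
    rw [PySem.List.insert_ofNat _ 12 _ (by simp)]
    rw [PySem.List.insert_ofNat _ 11 _ (by simp)]
    rw [PySem.List.insert_ofNat _ 7 _ (by simp)]
    rw [PySem.List.insert_ofNat _ 4 _ (by simp)]
    simp [PySem.List.pyGet?, PySem.List.pyIdx?]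
    refine ⟨?_, ?_, ?_, ?_⟩ <;> (rw [if_pos (by omega)]; simp)
  rw [hA, hB]

-- ===== VERDICT (by name: the statement is the Claim_ definition above) =====
set_option maxHeartbeats 2000000 in
theorem make_duplicate_list_spec : Claim_equal_make_duplicate_list := by
  intro l _
  unfold Spec_make_duplicate_list
  obtain _ | ⟨a1, l⟩ := l; · rfl
  obtain _ | ⟨a2, l⟩ := l; · rfl
  obtain _ | ⟨a3, l⟩ := l; · rfl
  obtain _ | ⟨a4, l⟩ := l; · rfl
  obtain _ | ⟨a5, l⟩ := l; · rfl
  obtain _ | ⟨a6, l⟩ := l; · rfl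
  obtain _ | ⟨a7, l⟩ := l; · rfl
  obtain _ | ⟨a8, l⟩ := l; · rfl
  obtain _ | ⟨a9, l⟩ := l; · rfl
  obtain _ | ⟨a10, l⟩ := l; · rfl
  obtain _ | ⟨a11, l⟩ := l; · rfl
  obtain _ | ⟨a12, l⟩ := l; · rfl
  exact pvBig a1 a2 a3 a4 a5 a6 a7 a8 a9 a10 a11 a12 l
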